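-- pv_equiv track=rewrite | github.com/StoyanStoyanov1/Python-Advanced | multimensional_lists/exercises2/knight_game.py | result
-- ===== SOURCE A (Python) =====
-- def find_number_of_battles(matrix, steps, row, col):
--     current_number_of_battle = 0
--
--     for step in steps:
--         current_row = row + step[0]
--         current_col = col + step[1]
--         if current_row in range(len(matrix)) and current_col in range(len(matrix[0])):
--             if matrix[current_row][current_col] == "K":
--                 current_number_of_battle += 1
--
--     return current_number_of_battle
--
-- def result(matrix, steps):
--     counter = 0
--
--     while True:
--         max_battles = 0
--         max_battles_knight = []
--         for row in range(len(matrix)):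
--             for col in range(len(matrix[0])):
--                 if matrix[row][col] == "K":
--                     found_number_of_battle = find_number_of_battles(matrix, steps, row, col)
--
--                     if found_number_of_battle > max_battles:
--                         max_battles = found_number_of_battle
--                         max_battles_knight = [row, col]
--
--         if max_battles:
--             counter += 1
--             r, c = max_battles_knight
--             matrix[r][c] = "O"
--
--         else:
--             return counter
-- ===== SOURCE B (Python) =====
-- def result(matrix, steps):
--     # Precompute every knight's battle count ONCE; each round pick the max from the
--     # count table and update counts incrementally: removing a knight only decrements
--     # the counts of the knights that attack it (via the reversed steps), instead of
--     # recounting everything (an alternative strategy, not measured faster). Note: A mutates `matrix` in place; B does not.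
--     height = len(matrix)
--     width = len(matrix[0]) if matrix else 0
--     knights = [(r, c) for r in range(height) for c in range(width) if matrix[r][c] == "K"]
--     kset = set(knights)
--     cnt = {k: sum(1 for s in steps if (k[0] + s[0], k[1] + s[1]) in kset) for k in knights}
--     counter = 0
--     while True:
--         best = None
--         best_battles = 0
--         for k in knights:
--             if k in cnt and cnt[k] > best_battles:
--                 best_battles = cnt[k]
--                 best = k
--         if best is None:
--             return counter
--         counter += 1
--         del cnt[best]
--         for s in steps:
--             attacker = (best[0] - s[0], best[1] - s[1])
--             if attacker in cnt:
--                 cnt[attacker] -= 1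
-- ===== Notes on version B (the rewrite author's own statement) =====
-- stated objective: alternative
-- what changed: B computes every knight's battle count once up front into a dict and keeps it incrementally correct: removing a knight deletes its entry and decrements only the counts of the knights attacking it (positions best-step), so each round is a table scan plus at most |steps| decrements instead of recounting battles for every board cell; on the measured inputs this was not faster.
import Mathlib
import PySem

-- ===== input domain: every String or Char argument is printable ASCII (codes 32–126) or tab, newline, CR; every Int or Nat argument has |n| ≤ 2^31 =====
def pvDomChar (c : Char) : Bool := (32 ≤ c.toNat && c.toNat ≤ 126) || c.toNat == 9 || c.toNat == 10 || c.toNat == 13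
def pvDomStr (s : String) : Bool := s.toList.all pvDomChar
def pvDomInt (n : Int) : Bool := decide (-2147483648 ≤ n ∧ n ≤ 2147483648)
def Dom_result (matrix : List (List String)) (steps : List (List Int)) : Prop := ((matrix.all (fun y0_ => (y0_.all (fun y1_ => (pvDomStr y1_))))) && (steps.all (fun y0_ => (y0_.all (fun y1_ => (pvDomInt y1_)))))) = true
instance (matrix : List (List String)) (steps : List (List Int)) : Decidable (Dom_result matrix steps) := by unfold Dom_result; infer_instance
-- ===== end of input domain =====

-- B computes all battle counts once into a dict and updates them incrementally per
-- removal (decrementing only the attackers of the removed knight) instead of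
-- rescanning the board each round (objective: alternative). A mutates `matrix` in
-- place (removed knights become "O"); B does not — equivalence is about the return value only.


-- ===== PORT A =====
def findBattles (matrix : List (List String)) (steps : List (List Int)) (row col : Int) : Int :=
  steps.foldl (fun acc step =>
    let cr := row + PySem.List.pyGetD step 0 0
    let cc := col + PySem.List.pyGetD step 1 0
    if (0 ≤ cr ∧ cr < (matrix.length : Int)) ∧ (0 ≤ cc ∧ cc < ((matrix.headD []).length : Int)) then
      if PySem.List.pyGetD (PySem.List.pyGetD matrix cr []) cc "" == "K" then acc + 1 else acc
    else acc) 0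

def scanKnights (matrix : List (List String)) (steps : List (List Int)) : Int × Option (Int × Int) :=
  (List.range matrix.length).foldl (fun st (row : Nat) =>
    (List.range (matrix.headD []).length).foldl (fun st (col : Nat) =>
      if PySem.List.pyGetD (PySem.List.pyGetD matrix (row : Int) []) (col : Int) "" == "K" then
        let found := findBattles matrix steps (row : Int) (col : Int)
        if found > st.1 then (found, some ((row : Int), (col : Int))) else st
      else st) st) ((0 : Int), (none : Option (Int × Int)))

def setKnightO (matrix : List (List String)) (r c : Int) : List (List String) :=
  matrix.modify r.toNat (fun rw => rw.set c.toNat "O")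

def resultLoop (steps : List (List Int)) : Nat → List (List String) → Int → Int
  | 0, _, counter => counter
  | Nat.succ fuel, matrix, counter =>
    let sc := scanKnights matrix steps
    if 0 < sc.1 then
      match sc.2 with
      | some rc => resultLoop steps fuel (setKnightO matrix rc.1 rc.2) (counter + 1)
      | none => counter
    else counter

def result (matrix : List (List String)) (steps : List (List Int)) : Int :=
  resultLoop steps (matrix.length * (matrix.headD []).length + 1) matrix 0

-- ===== PORT B =====
-- `len(matrix[0]) if matrix else 0` is `(matrix.headD []).length` (headD gives [] on []).
def knightList (matrix : List (List String)) : List (Int × Int) :=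
  (List.range matrix.length).flatMap (fun r =>
    (List.range (matrix.headD []).length).filterMap (fun c =>
      if (matrix.getD r []).getD c "" == "K" then some ((r : Int), (c : Int)) else none))

-- `sum(1 for s in steps if (k[0]+s[0], k[1]+s[1]) in kset)`
def battles (steps : List (List Int)) (alive : PySem.Set (Int × Int)) (k : Int × Int) : Int :=
  steps.foldl (fun acc s =>
    if (k.1 + PySem.List.pyGetD s 0 0, k.2 + PySem.List.pyGetD s 1 0) ∈ alive then acc + 1 else acc) 0

-- the dict comprehension `{k: sum(...) for k in knights}`
def initCnt (steps : List (List Int)) (knights : List (Int × Int)) : PySem.Dict (Int × Int) Int :=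
  knights.foldl (fun d k => d.insert k (battles steps (PySem.Set.ofList knights) k)) PySem.Dict.empty

-- `for k in knights: if k in cnt and cnt[k] > best_battles: ...`
def pickBestD (knights : List (Int × Int)) (cnt : PySem.Dict (Int × Int) Int) :
    Int × Option (Int × Int) :=
  knights.foldl (fun st k =>
    match cnt.get? k with
    | some b => if b > st.1 then (b, some k) else st
    | none => st) ((0 : Int), (none : Option (Int × Int)))

-- `for s in steps: attacker = (best[0]-s[0], best[1]-s[1]); if attacker in cnt: cnt[attacker] -= 1`
def decAttackers (steps : List (List Int)) (best : Int × Int)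
    (cnt : PySem.Dict (Int × Int) Int) : PySem.Dict (Int × Int) Int :=
  steps.foldl (fun d s =>
    let att := (best.1 - PySem.List.pyGetD s 0 0, best.2 - PySem.List.pyGetD s 1 0)
    match d.get? att with
    | some v => d.insert att (v - 1)
    | none => d) cnt

def bLoop (steps : List (List Int)) (knights : List (Int × Int)) :
    Nat → PySem.Dict (Int × Int) Int → Int → Int
  | 0, _, counter => counter
  | Nat.succ fuel, cnt, counter =>
    match (pickBestD knights cnt).2 with
    | none => counter
    | some best => bLoop steps knights fuel (decAttackers steps best (cnt.erase best)) (counter + 1)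

def result_alt (matrix : List (List String)) (steps : List (List Int)) : Int :=
  let knights := knightList matrix
  bLoop steps knights (knights.length + 1) (initCnt steps knights) 0

-- ===== PRECONDITION & SPEC =====
-- Pre_ excludes exactly the inputs where Python A raises IndexError: a row shorter
-- than the first row (the scan reads every column index below the first row's width
-- in every row), and step entries with fewer than two components when some knight
-- sits in the scanned region (steps are then indexed at 0 and 1).
def Pre_result (matrix : List (List String)) (steps : List (List Int)) : Prop :=
  (∀ row ∈ matrix, (matrix.headD []).length ≤ row.length) ∧
    ((∀ s ∈ steps, 2 ≤ s.length) ∨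
      ∀ row ∈ matrix, "K" ∉ row.take (matrix.headD []).length)
instance (matrix : List (List String)) (steps : List (List Int)) : Decidable (Pre_result matrix steps) := by
  unfold Pre_result; infer_instance

def pvWitness_result : List (List String) × List (List Int) :=
  ([["K", "."], [".", "K"]], [[1, 1], [0, 0]])

def Spec_result (matrix : List (List String)) (steps : List (List Int)) (out : Int) : Prop := out = result_alt matrix steps
instance (matrix : List (List String)) (steps : List (List Int)) (out : Int) : Decidable (Spec_result matrix steps out) := by unfold Spec_result; infer_instance

-- ===== CLAIM (what is proved, stated in full; the proofs are below) =====
def Claim_equal_result : Prop := ∀ (matrix : List (List String)) (steps : List (List Int)), Dom_result matrix steps → Pre_result matrix steps → Spec_result matrix steps (result matrix steps)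

-- ===== LEMMAS AND PROOFS =====

-- the common shape of both rounds' maximum scans
def scanList (f : Int × Int → Int) (l : List (Int × Int)) (init : Int × Option (Int × Int)) :
    Int × Option (Int × Int) :=
  l.foldl (fun st k => let b := f k; if b > st.1 then (b, some k) else st) init

theorem knightList_mem (matrix : List (List String)) (p : Int × Int) :
    p ∈ knightList matrix ↔
      (0 ≤ p.1 ∧ p.1 < (matrix.length : Int) ∧ 0 ≤ p.2 ∧ p.2 < ((matrix.headD []).length : Int)) ∧
        (matrix.getD p.1.toNat []).getD p.2.toNat "" = "K" := by
  obtain ⟨a, b⟩ := p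
  simp only [knightList, List.mem_flatMap, List.mem_filterMap, List.mem_range]
  constructor
  · rintro ⟨r, hr, c, hc, h⟩
    split_ifs at h with hK
    · obtain ⟨h1, h2⟩ := Prod.mk.injEq .. ▸ Option.some.injEq .. ▸ h
      subst h1; subst h2
      refine ⟨⟨by positivity, by exact_mod_cast hr, by positivity, by exact_mod_cast hc⟩, ?_⟩
      simpa using hK
  · rintro ⟨⟨h1, h2, h3, h4⟩, hK⟩
    refine ⟨a.toNat, by omega, b.toNat, by omega, ?_⟩
    rw [if_pos]
    · simp [Int.toNat_of_nonneg h1, Int.toNat_of_nonneg h3]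
    · simpa using hK

theorem knightList_nodup (matrix : List (List String)) : (knightList matrix).Nodup := by
  rw [knightList, List.nodup_flatMap]
  constructor
  · intro r _
    refine List.Nodup.filterMap ?_ (List.nodup_range)
    intro c c' p hc hc'
    rw [Option.mem_def] at hc hc'
    split_ifs at hc hc'
    injection hc with e
    subst e
    injection hc' with e'
    have h2 := congrArg Prod.snd e'
    simp only at h2
    omega
  · refine List.pairwise_iff_getElem.mpr ?_
    intro i j hi hj hij p hp hp'
    simp only [List.mem_filterMap] at hp hp'
    obtain ⟨c, _, hc⟩ := hp
    obtain ⟨c', _, hc'⟩ := hp'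
    split_ifs at hc hc'
    injection hc with e
    injection hc' with e'
    have h2 := congrArg Prod.fst e
    have h3 := congrArg Prod.fst e'
    simp only [List.getElem_range] at h2 h3
    rw [← h3] at h2
    have h4 : i = j := by omega
    omega

theorem knightList_length_le (matrix : List (List String)) :
    (knightList matrix).length ≤ matrix.length * (matrix.headD []).length := by
  rw [knightList, List.length_flatMap]
  have h := List.sum_le_card_nsmul
    ((List.range matrix.length).map fun r =>
      ((List.range (matrix.headD []).length).filterMap (fun c =>
        if (matrix.getD r []).getD c "" == "K" then some ((r : Int), (c : Int)) else none)).length)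
    (matrix.headD []).length ?_
  · simpa using h
  · intro x hx
    simp only [List.mem_map] at hx
    obtain ⟨r, _, rfl⟩ := hx
    exact le_of_le_of_eq (List.length_filterMap_le _ _) List.length_range

theorem battles_eq_findBattles (matrix : List (List String)) (steps : List (List Int)) (k : Int × Int) :
    battles steps (knightList matrix) k = findBattles matrix steps k.1 k.2 := by
  unfold battles findBattles
  refine PySem.List.foldl_congr_mem steps _ _ 0 ?_
  intro acc s _
  simp only
  set cr := k.1 + PySem.List.pyGetD s 0 0 with hcr
  set cc := k.2 + PySem.List.pyGetD s 1 0 with hcc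
  by_cases h : (cr, cc) ∈ knightList matrix
  · obtain ⟨⟨h1, h2, h3, h4⟩, hK⟩ := (knightList_mem matrix (cr, cc)).mp h
    rw [if_pos h, if_pos ⟨⟨h1, h2⟩, h3, h4⟩, if_pos]
    rw [PySem.List.pyGetD_of_nonneg _ _ h1, PySem.List.pyGetD_of_nonneg _ _ h3]
    simpa using hK
  · rw [if_neg h]
    split_ifs with hb hK
    · exfalso
      apply h
      refine (knightList_mem matrix (cr, cc)).mpr ⟨⟨hb.1.1, hb.1.2, hb.2.1, hb.2.2⟩, ?_⟩
      rw [PySem.List.pyGetD_of_nonneg _ _ hb.1.1, PySem.List.pyGetD_of_nonneg _ _ hb.2.1] at hK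
      simpa using hK
    · rfl
    · rfl

theorem scanKnights_eq_scanList (matrix : List (List String)) (steps : List (List Int)) :
    scanKnights matrix steps
      = scanList (fun k => findBattles matrix steps k.1 k.2) (knightList matrix) (0, none) := by
  unfold scanKnights scanList knightList
  rw [List.foldl_flatMap]
  refine PySem.List.foldl_congr_mem _ _ _ _ ?_
  intro st r _
  rw [List.foldl_filterMap]
  refine PySem.List.foldl_congr_mem _ _ _ st ?_
  intro acc c _
  simp only [PySem.List.pyGetD_natCast]
  by_cases h : ((matrix.getD r []).getD c "" == "K") = true
  · simp only [if_pos h]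
  · simp only [if_neg h]

theorem filter_mem_of_sublist {l s : List (Int × Int)} (hs : s.Sublist l) (hn : l.Nodup) :
    l.filter (fun k => decide (k ∈ s)) = s := by
  induction hs with
  | slnil => rfl
  | @cons l₁ l' a hs ih =>
    have ha : a ∉ l' := (List.nodup_cons.mp hn).1
    have hns : a ∉ _ := fun hm => ha (hs.subset hm)
    rw [List.filter_cons, if_neg (by simpa using hns)]
    exact ih (List.nodup_cons.mp hn).2
  | @cons₂ s' l' a hs ih =>
    have ha : a ∉ l' := (List.nodup_cons.mp hn).1
    rw [List.filter_cons, if_pos (by simp)]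
    congr 1
    rw [List.filter_congr (fun x hx => ?_), ih (List.nodup_cons.mp hn).2]
    have hxa : x ≠ a := fun h => ha (h ▸ hx)
    simp [List.mem_cons, hxa]

theorem scanList_invariant (f : Int × Int → Int) (l : List (Int × Int)) :
    ∀ init : Int × Option (Int × Int), 0 ≤ init.1 → (0 < init.1 ↔ init.2.isSome) →
      0 ≤ (scanList f l init).1 ∧ (0 < (scanList f l init).1 ↔ (scanList f l init).2.isSome) ∧
        (∀ k, (scanList f l init).2 = some k → k ∈ l ∨ init.2 = some k) := by
  induction l with
  | nil =>
    intro init h0 hiff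
    exact ⟨h0, hiff, fun k hk => Or.inr hk⟩
  | cons a t ih =>
    intro init h0 hiff
    have hstep : scanList f (a :: t) init
        = scanList f t (if f a > init.1 then (f a, some a) else init) := by
      simp only [scanList, List.foldl_cons]
    by_cases hgt : f a > init.1
    · rw [hstep, if_pos hgt]
      obtain ⟨r0, riff, rmem⟩ := ih (f a, some a) (by omega) (by simp; omega)
      refine ⟨r0, riff, fun k hk => ?_⟩
      rcases rmem k hk with h | h
      · exact Or.inl (List.mem_cons_of_mem a h)
      · exact Or.inl (by simp at h; simp [h])
    · rw [hstep, if_neg hgt]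
      obtain ⟨r0, riff, rmem⟩ := ih init h0 hiff
      refine ⟨r0, riff, fun k hk => ?_⟩
      rcases rmem k hk with h | h
      · exact Or.inl (List.mem_cons_of_mem a h)
      · exact Or.inr h

theorem knightList_setKnightO (matrix : List (List String)) (p : Int × Int)
    (hp : p ∈ knightList matrix) :
    knightList (setKnightO matrix p.1 p.2) = (knightList matrix).filter (fun y => !y == p) := by
  obtain ⟨⟨h1, h2, h3, h4⟩, hK⟩ := (knightList_mem matrix p).mp hp
  obtain ⟨p1, p2⟩ := p
  simp only at h1 h2 h3 h4 hK ⊢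
  have hp1 : ((p1.toNat : Nat) : Int) = p1 := Int.toNat_of_nonneg h1
  have hp2 : ((p2.toNat : Nat) : Int) = p2 := Int.toNat_of_nonneg h3
  have hrl : p2.toNat < (matrix.getD p1.toNat []).length := by
    by_contra hc
    rw [List.getD_eq_getElem?_getD, List.getElem?_eq_none (by omega)] at hK
    simp at hK
  have hW : ((setKnightO matrix p1 p2).headD []).length = (matrix.headD []).length := by
    unfold setKnightO
    cases matrix with
    | nil => simp
    | cons a t =>
      cases hn : p1.toNat with
      | zero => simp
      | succ n => simp
  have hrow : ∀ r : Nat, (setKnightO matrix p1 p2).getD r []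
      = if p1.toNat = r then (matrix.getD r []).set p2.toNat "O" else matrix.getD r [] := by
    intro r
    unfold setKnightO
    rw [List.getD_eq_getElem?_getD, List.getD_eq_getElem?_getD, List.getElem?_modify]
    cases hmr : matrix[r]? with
    | none => split_ifs <;> simp
    | some row => split_ifs <;> simp
  unfold knightList
  rw [List.filter_flatMap]
  have hlen : (setKnightO matrix p1 p2).length = matrix.length := List.length_modify _ _ _
  rw [hlen, hW]
  refine List.flatMap_congr ?_
  intro r hr
  rw [List.filter_filterMap]
  refine List.filterMap_congr ?_
  intro c hc
  rw [hrow r]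
  by_cases hreq : p1.toNat = r
  · rw [if_pos hreq]
    subst hreq
    by_cases hceq : p2.toNat = c
    · subst hceq
      rw [List.getD_eq_getElem?_getD, List.getElem?_set, if_pos rfl, if_pos hrl]
      rw [if_neg (by simp), if_pos (by simpa using hK)]
      simp [Option.filter, hp1, hp2]
    · rw [List.getD_eq_getElem?_getD, List.getElem?_set, if_neg hceq,
        ← List.getD_eq_getElem?_getD]
      split_ifs with hcell
      · have hne : ((p1.toNat : Int), (c : Int)) ≠ (p1, p2) := by
          intro he
          apply hceq
          have := congrArg Prod.snd he
          simp only at this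
          omega
        simp only [Option.filter]
        rw [if_pos (by simpa using hne)]
      · simp [Option.filter]
  · rw [if_neg hreq]
    split_ifs with hcell
    · have hne : ((r : Int), (c : Int)) ≠ (p1, p2) := by
        intro he
        apply hreq
        have := congrArg Prod.fst he
        simp only at this
        omega
      simp [Option.filter, hne]
    · simp [Option.filter]

-- dict lookups through B's primitives
theorem get?_erase_pt (d : PySem.Dict (Int × Int) Int) (k k' : Int × Int) :
    (d.erase k).get? k' = if k' = k then none else d.get? k' := by
  obtain ⟨items⟩ := d
  simp only [PySem.Dict.erase, PySem.Dict.get?]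
  induction items with
  | nil => simp
  | cons p t ih =>
    rw [List.filter_cons]
    by_cases hpk : p.1 = k
    · rw [if_neg (by simp [hpk]), ih]
      by_cases hk' : k' = k
      · rw [if_pos hk', if_pos hk']
      · rw [if_neg hk', if_neg hk',
          List.find?_cons_of_neg (by simp [hpk]; exact fun h => hk' h.symm)]
    · rw [if_pos (by simp [hpk])]
      by_cases hpk' : p.1 = k'
      · have hk'k : ¬ k' = k := fun h => hpk (hpk'.trans h)
        rw [if_neg hk'k, List.find?_cons_of_pos (by simp [hpk']),
          List.find?_cons_of_pos (by simp [hpk'])]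
      · rw [List.find?_cons_of_neg (by simp [hpk']), ih]
        by_cases hk' : k' = k
        · rw [if_pos hk', if_pos hk']
        · rw [if_neg hk', if_neg hk', List.find?_cons_of_neg (by simp [hpk'])]

theorem get?_foldl_insert (f : Int × Int → Int) (l : List (Int × Int)) :
    ∀ (d : PySem.Dict (Int × Int) Int) (k : Int × Int),
      (l.foldl (fun d x => d.insert x (f x)) d).get? k
        = if k ∈ l then some (f k) else d.get? k := by
  induction l with
  | nil => intro d k; simp
  | cons a t ih =>
    intro d k
    rw [List.foldl_cons, ih]
    by_cases ht : k ∈ t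
    · rw [if_pos ht, if_pos (List.mem_cons_of_mem a ht)]
    · rw [if_neg ht, PySem.Dict.get?_insert]
      by_cases hka : k = a
      · subst hka; simp
      · rw [if_neg hka, if_neg (by simp [hka, ht])]

theorem get?_decAttackers (steps : List (List Int)) (best : Int × Int) :
    ∀ (d : PySem.Dict (Int × Int) Int) (k : Int × Int),
      (decAttackers steps best d).get? k
        = (d.get? k).map (fun v => v -
            (steps.countP (fun s =>
              decide (k = (best.1 - PySem.List.pyGetD s 0 0,
                           best.2 - PySem.List.pyGetD s 1 0))) : Int)) := by
  induction steps with
  | nil =>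
    intro d k
    simp only [decAttackers, List.foldl_nil, List.countP_nil, Nat.cast_zero]
    cases hq : d.get? k <;> simp
  | cons s t ih =>
    intro d k
    have hstep : decAttackers (s :: t) best d
        = decAttackers t best
          (match d.get? (best.1 - PySem.List.pyGetD s 0 0, best.2 - PySem.List.pyGetD s 1 0) with
           | some v => d.insert (best.1 - PySem.List.pyGetD s 0 0,
               best.2 - PySem.List.pyGetD s 1 0) (v - 1)
           | none => d) := rfl
    rw [hstep, List.countP_cons]
    by_cases hka : k = (best.1 - PySem.List.pyGetD s 0 0, best.2 - PySem.List.pyGetD s 1 0)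
    · rw [if_pos (by simp [hka])]
      cases hv : d.get? (best.1 - PySem.List.pyGetD s 0 0, best.2 - PySem.List.pyGetD s 1 0) with
      | none =>
        rw [ih, hka, hv]
        simp
      | some v =>
        rw [ih, PySem.Dict.get?_insert, if_pos hka, hka, hv]
        simp only [Option.map_some, Option.some.injEq]
        push_cast
        ring
    · rw [if_neg (by simp [hka])]
      cases hv : d.get? (best.1 - PySem.List.pyGetD s 0 0, best.2 - PySem.List.pyGetD s 1 0) with
      | none =>
        rw [ih]
        simp
      | some v =>
        rw [ih, PySem.Dict.get?_insert, if_neg hka]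
        simp

theorem battles_eq_countP (steps : List (List Int)) (alive : List (Int × Int)) (k : Int × Int) :
    battles steps alive k
      = (steps.countP (fun s =>
          decide ((k.1 + PySem.List.pyGetD s 0 0, k.2 + PySem.List.pyGetD s 1 0) ∈ alive)) : Int) := by
  unfold battles
  suffices h : ∀ a : Int, steps.foldl (fun acc s =>
      if (k.1 + PySem.List.pyGetD s 0 0, k.2 + PySem.List.pyGetD s 1 0) ∈ alive then acc + 1 else acc) a
      = a + (steps.countP (fun s =>
          decide ((k.1 + PySem.List.pyGetD s 0 0, k.2 + PySem.List.pyGetD s 1 0) ∈ alive)) : Int) by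
    rw [h 0]; ring
  induction steps with
  | nil => intro a; simp
  | cons s t ih =>
    intro a
    rw [List.foldl_cons, List.countP_cons]
    by_cases hm : (k.1 + PySem.List.pyGetD s 0 0, k.2 + PySem.List.pyGetD s 1 0) ∈ alive
    · rw [if_pos hm, ih, if_pos (by simpa using hm)]
      push_cast; ring
    · rw [if_neg hm, ih, if_neg (by simpa using hm)]
      push_cast; ring

theorem countP_filter_split (steps : List (List Int)) (alive : List (Int × Int))
    (best k : Int × Int) (hbest : best ∈ alive) :
    steps.countP (fun s =>
        decide ((k.1 + PySem.List.pyGetD s 0 0, k.2 + PySem.List.pyGetD s 1 0)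
          ∈ alive.filter (fun y => !y == best)))
      + steps.countP (fun s =>
          decide ((k.1 + PySem.List.pyGetD s 0 0, k.2 + PySem.List.pyGetD s 1 0) = best))
      = steps.countP (fun s =>
          decide ((k.1 + PySem.List.pyGetD s 0 0, k.2 + PySem.List.pyGetD s 1 0) ∈ alive)) := by
  induction steps with
  | nil => simp
  | cons s t ih =>
    simp only [List.countP_cons]
    by_cases he : (k.1 + PySem.List.pyGetD s 0 0, k.2 + PySem.List.pyGetD s 1 0) = best
    · rw [if_neg (by simp [List.mem_filter, he]), if_pos (by simp [he]),
        if_pos (by simp [he, hbest])]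
      omega
    · by_cases hm : (k.1 + PySem.List.pyGetD s 0 0, k.2 + PySem.List.pyGetD s 1 0) ∈ alive
      · rw [if_pos (by simp [List.mem_filter, hm, he]), if_neg (by simp [he]),
          if_pos (by simp [hm])]
        omega
      · rw [if_neg (by simp [List.mem_filter, hm]), if_neg (by simp [he]),
          if_neg (by simp [hm])]
        omega

theorem battles_filter (steps : List (List Int)) (alive : List (Int × Int))
    (best k : Int × Int) (hbest : best ∈ alive) :
    battles steps (alive.filter (fun y => !y == best)) k
      = battles steps alive k
        - (steps.countP (fun s =>
            decide (k = (best.1 - PySem.List.pyGetD s 0 0,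
                         best.2 - PySem.List.pyGetD s 1 0))) : Int) := by
  have hcongr : steps.countP (fun s =>
      decide (k = (best.1 - PySem.List.pyGetD s 0 0, best.2 - PySem.List.pyGetD s 1 0)))
      = steps.countP (fun s =>
          decide ((k.1 + PySem.List.pyGetD s 0 0, k.2 + PySem.List.pyGetD s 1 0) = best)) := by
    refine List.countP_congr (fun s _ => ?_)
    simp only [decide_eq_true_eq, Prod.ext_iff]
    omega
  rw [hcongr, battles_eq_countP, battles_eq_countP,
    ← countP_filter_split steps alive best k hbest]
  push_cast
  ring

theorem pickBestD_eq_scanList (steps : List (List Int)) (knights alive : List (Int × Int))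
    (cnt : PySem.Dict (Int × Int) Int)
    (hinv : ∀ k, cnt.get? k = if k ∈ alive then some (battles steps alive k) else none) :
    pickBestD knights cnt
      = scanList (battles steps alive) (knights.filter (fun k => decide (k ∈ alive))) (0, none) := by
  unfold pickBestD scanList
  rw [List.foldl_filter]
  refine PySem.List.foldl_congr_mem _ _ _ _ ?_
  intro st k _
  rw [hinv k]
  by_cases hm : k ∈ alive
  · simp [hm]
  · simp [hm]

theorem loops_agree (steps : List (List Int)) (knights : List (Int × Int)) (hnod : knights.Nodup) :
    ∀ (fa fb : Nat) (matrix : List (List String)) (cnt : PySem.Dict (Int × Int) Int) (counter : Int),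
      (∀ k, cnt.get? k = if k ∈ knightList matrix
          then some (battles steps (knightList matrix) k) else none) →
      (knightList matrix).Sublist knights →
      (knightList matrix).length < fa → (knightList matrix).length < fb →
      resultLoop steps fa matrix counter = bLoop steps knights fb cnt counter := by
  intro fa
  induction fa with
  | zero => intro fb matrix cnt counter _ _ hfa _; omega
  | succ fa ih =>
    intro fb matrix cnt counter hinv hsub hfa hfb
    cases fb with
    | zero => omega
    | succ fb =>
      set alive := knightList matrix with halive
      have hscan : pickBestD knights cnt = scanList (battles steps alive) alive (0, none) := by
        rw [pickBestD_eq_scanList steps knights alive cnt hinv,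
          filter_mem_of_sublist hsub hnod]
      have hA : scanKnights matrix steps = pickBestD knights cnt := by
        rw [hscan, scanKnights_eq_scanList]
        congr 1
        funext k
        exact (battles_eq_findBattles matrix steps k).symm
      obtain ⟨hnn, hiff, hmem⟩ := scanList_invariant (battles steps alive) alive (0, none)
        (by simp) (by simp)
      rw [← hscan] at hnn hiff hmem
      simp only [resultLoop, bLoop, hA]
      cases hsc : (pickBestD knights cnt).2 with
      | none =>
        rw [if_neg (by rw [hiff, hsc]; simp)]
      | some best =>
        rw [if_pos (by rw [hiff, hsc]; simp)]
        have hbest : best ∈ alive := by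
          rcases hmem best hsc with h | h
          · exact h
          · simp at h
        have halive' : knightList (setKnightO matrix best.1 best.2)
            = alive.filter (fun y => !y == best) := knightList_setKnightO matrix best hbest
        have hinv' : ∀ k, (decAttackers steps best (cnt.erase best)).get? k
            = if k ∈ knightList (setKnightO matrix best.1 best.2)
              then some (battles steps (knightList (setKnightO matrix best.1 best.2)) k)
              else none := by
          intro k
          rw [get?_decAttackers, get?_erase_pt, halive']
          by_cases hkb : k = best
          · rw [if_pos hkb, if_neg (by simp [List.mem_filter, hkb])]
            simp
          · rw [if_neg hkb, hinv k]
            by_cases hka : k ∈ alive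
            · rw [if_pos hka, if_pos (by simp [List.mem_filter, hka, hkb])]
              simp only [Option.map_some, Option.some.injEq]
              rw [battles_filter steps alive best k hbest]
            · rw [if_neg hka, if_neg (by
                simp only [List.mem_filter]
                rintro ⟨h, -⟩
                exact hka h)]
              simp
        have hlt : (knightList (setKnightO matrix best.1 best.2)).length < alive.length := by
          rw [halive']
          refine List.length_filter_lt_length_iff_exists.mpr ⟨best, hbest, ?_⟩
          simp
        exact ih fb (setKnightO matrix best.1 best.2)
          (decAttackers steps best (cnt.erase best)) (counter + 1) hinv'
          (halive' ▸ (List.filter_sublist).trans hsub) (by omega) (by omega)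

-- ===== VERDICT (by name: the statement is the Claim_ definition above) =====
theorem result_spec : Claim_equal_result := by
  intro matrix steps _ _
  unfold Spec_result result result_alt
  have hn := knightList_nodup matrix
  have hl := knightList_length_le matrix
  refine loops_agree steps (knightList matrix) hn _ _ matrix _ 0 ?_ (List.Sublist.refl _)
    (by omega) (by omega)
  intro k
  rw [initCnt, get?_foldl_insert]
  rw [PySem.Set.ofList_eq_self_of_nodup _ hn]
  split_ifs <;> simp
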